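-- pv_equiv track=rewrite | github.com/jinjose/geoai-msds | Inference_Pipeline/dataprep/storm/raw_data/download_storm_daily_to_s3.py | parse_years
-- ===== SOURCE A (Python) =====
-- from typing import Iterable, List, Optional, Tuple
--
-- def parse_years(spec: str) -> List[int]:
--     """
--     Accept:
--       "2019"
--       "2013,2014,2015"
--       "2013-2025"
--     """
--     spec = spec.strip()
--     if "," in spec:
--         out = []
--         for part in spec.split(","):
--             out.extend(parse_years(part))
--         return sorted(set(out))
--     if "-" in spec:
--         a, b = spec.split("-", 1)
--         a, b = int(a), int(b)
--         if a > b: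
--             a, b = b, a
--         return list(range(a, b + 1))
--     return [int(spec)]
-- ===== SOURCE B (Python) =====
-- def _insert_unique(years, y):
--     # insert y into the sorted list `years`, skipping it if already present
--     i = 0
--     while i < len(years) and years[i] < y:
--         i += 1
--     if i == len(years) or years[i] != y:
--         years.insert(i, y)
--
-- def parse_years(spec):
--     years = []  # kept strictly increasing, no duplicates
--     for part in spec.strip().split(","):
--         part = part.strip()
--         if "-" in part:
--             lo, hi = part.split("-", 1)
--             lo, hi = int(lo), int(hi)
--             for y in range(min(lo, hi), max(lo, hi) + 1):
--                 _insert_unique(years, y)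
--         else:
--             _insert_unique(years, int(part))
--     return years
-- ===== Notes on version B (the rewrite author's own statement) =====
-- stated objective: alternative
-- what changed: Replaces A's recurse-collect-then-sorted(set(...)) with a single flat loop that keeps the result strictly sorted and duplicate-free at all times via ordered insertion, so no final sort or set is ever built.
import Mathlib
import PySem

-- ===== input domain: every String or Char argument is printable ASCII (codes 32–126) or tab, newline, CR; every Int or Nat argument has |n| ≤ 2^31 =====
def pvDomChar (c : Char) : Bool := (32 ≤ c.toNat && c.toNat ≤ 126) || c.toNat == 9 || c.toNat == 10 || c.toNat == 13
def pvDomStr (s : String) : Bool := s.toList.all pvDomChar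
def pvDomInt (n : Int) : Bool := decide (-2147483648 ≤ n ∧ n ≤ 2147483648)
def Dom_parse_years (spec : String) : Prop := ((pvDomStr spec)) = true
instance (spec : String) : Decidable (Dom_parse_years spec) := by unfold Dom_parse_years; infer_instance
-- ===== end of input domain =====

-- B replaces A's recurse-collect-then-sorted(set(...)) by one flat loop that keeps the
-- result strictly sorted and duplicate-free at all times via ordered insertion (alternative
-- decomposition; no final sort or set is built).

-- ===== PORT A =====
-- A's non-comma tail (the '-'-range branch and the single-int branch), on an already
-- stripped string; A's recursive call parse_years(part) hits exactly this code, since a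
-- part produced by split(",") can never contain ",": the one-level recursion is unrolled
-- into this helper (behaviour identical; int() is ofStr?, its ValueError excluded by Pre_).
def pyParseSimple (spec : String) : List Int :=
  if PySem.Str.isIn "-" spec then
    match PySem.Str.splitMax? spec "-" 1 with
    | some [a0, b0] =>
        let a := (PySem.Int.ofStr? a0).getD 0
        let b := (PySem.Int.ofStr? b0).getD 0
        if a > b then PySem.List.pyRange b (a + 1) 1 else PySem.List.pyRange a (b + 1) 1
    | _ => []
  else [(PySem.Int.ofStr? spec).getD 0]

def parse_years (spec : String) : List Int :=
  if PySem.Str.isIn "," (PySem.Str.strip spec) then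
    PySem.List.sorted
      (PySem.Set.ofList
        (((PySem.Str.split? (PySem.Str.strip spec) ",").getD []).foldl
          (fun out part => out ++ pyParseSimple (PySem.Str.strip part)) []))
      (fun x => x)
  else pyParseSimple (PySem.Str.strip spec)

-- ===== PORT B =====
-- _insert_unique: the linear scan to the first element ≥ y becomes structural recursion
def pvInsertUnique (years : List Int) (y : Int) : List Int :=
  match years with
  | [] => [y]
  | v :: rest =>
      if v < y then v :: pvInsertUnique rest y
      else if v = y then v :: rest
      else y :: v :: rest

-- the body of B's loop over the comma parts
def pvBStep (acc : List Int) (part : String) : List Int :=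
  let p := PySem.Str.strip part
  if PySem.Str.isIn "-" p then
    match PySem.Str.splitMax? p "-" 1 with
    | some [l0, h0] =>
        let lo := (PySem.Int.ofStr? l0).getD 0
        let hi := (PySem.Int.ofStr? h0).getD 0
        (PySem.List.pyRange (min lo hi) (max lo hi + 1) 1).foldl pvInsertUnique acc
    | _ => acc
  else pvInsertUnique acc ((PySem.Int.ofStr? p).getD 0)

def parse_years_alt (spec : String) : List Int :=
  ((PySem.Str.split? (PySem.Str.strip spec) ",").getD []).foldl pvBStep []

-- ===== PRECONDITION & SPEC =====
-- Pre_ excludes exactly the inputs where Python A raises ValueError: some stripped comma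
-- part is neither a valid int() literal nor, when it contains '-', split by its first '-'
-- into two valid int() literals (e.g. "", "abc", "-5", "2-3-4").
def pvPartOK (part : String) : Bool :=
  let p := PySem.Str.strip part
  if PySem.Str.isIn "-" p then
    match PySem.Str.splitMax? p "-" 1 with
    | some [a0, b0] => (PySem.Int.ofStr? a0).isSome && (PySem.Int.ofStr? b0).isSome
    | _ => false
  else (PySem.Int.ofStr? p).isSome

def Pre_parse_years (spec : String) : Prop :=
  ((PySem.Str.split? (PySem.Str.strip spec) ",").getD []).all pvPartOK = true
instance (spec : String) : Decidable (Pre_parse_years spec) := by unfold Pre_parse_years; infer_instance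

def pvWitness_parse_years : String := " 2013-2015 , 2019 ,5-3"

def Spec_parse_years (spec : String) (out : List Int) : Prop := out = parse_years_alt spec
instance (spec : String) (out : List Int) : Decidable (Spec_parse_years spec out) := by unfold Spec_parse_years; infer_instance

-- ===== CLAIM (what is proved, stated in full; the proofs are below) =====
def Claim_equal_parse_years : Prop := ∀ (spec : String), Dom_parse_years spec → Pre_parse_years spec → Spec_parse_years spec (parse_years spec)

-- ===== LEMMAS AND PROOFS =====

-- strip is idempotent (used for the no-comma case, where B strips the single part again)
theorem pvDwIdem (p : Char → Bool) (l : List Char) :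
    List.dropWhile p (List.dropWhile p l) = List.dropWhile p l := by
  induction l with
  | nil => simp
  | cons c t ih =>
    by_cases h : p c = true
    · simpa [h] using ih
    · simp [h]

theorem pvDwPrefix (p : Char → Bool) {y z : List Char}
    (hy : List.dropWhile p y = y) (hz : z <+: y) : List.dropWhile p z = z := by
  cases z with
  | nil => simp
  | cons c t =>
    cases y with
    | nil => exact absurd (List.IsPrefix.length_le hz) (by simp)
    | cons d u =>
      obtain ⟨r, hr⟩ := hz
      have hcd : c = d := by
        have := congrArg (fun l => l.head?) hr
        simpa using this
      by_cases h : p d = true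
      · exfalso
        rw [List.dropWhile_cons, if_pos h] at hy
        have := congrArg List.length hy
        have hle := List.length_dropWhile_le p u
        simp at this
        omega
      · rw [hcd, List.dropWhile_cons, if_neg h]

theorem pvStripStrip (s : List Char) :
    PySem.Chars.strip (PySem.Chars.strip s) = PySem.Chars.strip s := by
  unfold PySem.Chars.strip PySem.Chars.lstrip PySem.Chars.rstrip
  set sp := PySem.Chars.isspace
  set y := List.dropWhile sp s with hy
  have hyy : List.dropWhile sp y = y := pvDwIdem sp s
  set z := (List.dropWhile sp y.reverse).reverse with hzdef
  have hzrev : z.reverse = List.dropWhile sp y.reverse := by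
    rw [hzdef, List.reverse_reverse]
  have hzy : z <+: y := by
    rw [← List.reverse_suffix, hzrev]
    exact List.dropWhile_suffix sp
  have hlz : List.dropWhile sp z = z := pvDwPrefix sp hyy hzy
  rw [hlz, hzrev, pvDwIdem, ← hzrev, List.reverse_reverse]

theorem pvStrStripStrip (s : String) :
    PySem.Str.strip (PySem.Str.strip s) = PySem.Str.strip s := by
  simp [PySem.Str.strip, pvStripStrip]

-- split(",") of a comma-free string is the singleton
theorem pvSplitGoNoSep (sep : List Char) :
    ∀ (fuel : Nat) (l cur acc : _), ¬ sep <:+: l →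
      PySem.Chars.splitOn.go sep fuel l cur acc = ((cur.reverse ++ l) :: acc).reverse := by
  intro fuel
  induction fuel with
  | zero => intro l cur acc _; rw [PySem.Chars.splitOn.go]
  | succ fuel ih =>
    intro l cur acc h
    cases l with
    | nil =>
      rw [PySem.Chars.splitOn.go]
      · simp
      all_goals omega
    | cons c rest =>
      have hpre : sep.isPrefixOf (c :: rest) = false := by
        rw [Bool.eq_false_iff]
        intro hp
        exact h (List.isPrefixOf_iff_prefix.mp hp).isInfix
      rw [PySem.Chars.splitOn.go, if_neg (by simp [hpre])]
      rw [ih rest (c :: cur) acc (fun hinf => h (List.infix_cons hinf))]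
      simp

theorem pvSplitNoComma (s : String) (h : PySem.Str.isIn "," s = false) :
    (PySem.Str.split? s ",").getD [] = [s] := by
  have hinf : ¬ (",".toList <:+: s.toList) := by
    rw [← PySem.Chars.isIn_eq_false_iff]
    simpa using h
  unfold PySem.Str.split? PySem.Chars.split?
  rw [if_neg (by decide)]
  unfold PySem.Chars.splitOn
  rw [pvSplitGoNoSep ",".toList _ _ _ _ hinf]
  simp

-- A's per-part output is strictly increasing
theorem pvRangePairwise (a b : Int) :
    (PySem.List.pyRange a b 1).Pairwise (· < ·) := by
  rw [PySem.List.pyRange_of_pos a b (by norm_num)]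
  refine List.Pairwise.map _ (fun x y hxy => ?_) List.pairwise_lt_range
  omega

theorem pvSimplePairwise (p : String) : (pyParseSimple p).Pairwise (· < ·) := by
  unfold pyParseSimple
  by_cases hd : PySem.Str.isIn "-" p = true
  · rw [if_pos hd]
    cases hs : PySem.Str.splitMax? p "-" 1 with
    | none => simp
    | some l =>
      match l with
      | [] => simp
      | [a0] => simp
      | a0 :: b0 :: c0 :: t => simp
      | [a0, b0] =>
        dsimp only
        by_cases hab : (PySem.Int.ofStr? a0).getD 0 > (PySem.Int.ofStr? b0).getD 0
        · rw [if_pos hab]; exact pvRangePairwise _ _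
        · rw [if_neg hab]; exact pvRangePairwise _ _
  · rw [if_neg hd]
    simp

-- ordered insertion: membership and sortedness
theorem pvIUMem (acc : List Int) (y x : Int) :
    x ∈ pvInsertUnique acc y ↔ x = y ∨ x ∈ acc := by
  induction acc with
  | nil => simp [pvInsertUnique]
  | cons v rest ih =>
    unfold pvInsertUnique
    by_cases h1 : v < y
    · rw [if_pos h1]; simp [ih]; tauto
    · rw [if_neg h1]
      by_cases h2 : v = y
      · rw [if_pos h2]; subst h2; simp
      · rw [if_neg h2]; simp

theorem pvIUPairwise (acc : List Int) (y : Int) (h : acc.Pairwise (· < ·)) :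
    (pvInsertUnique acc y).Pairwise (· < ·) := by
  induction acc with
  | nil => simp [pvInsertUnique]
  | cons v rest ih =>
    rw [List.pairwise_cons] at h
    unfold pvInsertUnique
    by_cases h1 : v < y
    · rw [if_pos h1, List.pairwise_cons]
      refine ⟨fun z hz => ?_, ih h.2⟩
      rcases (pvIUMem rest y z).mp hz with rfl | hz'
      · exact h1
      · exact h.1 z hz'
    · rw [if_neg h1]
      by_cases h2 : v = y
      · rw [if_pos h2, List.pairwise_cons]; exact h
      · rw [if_neg h2, List.pairwise_cons]
        have hyv : y < v := lt_of_le_of_ne (not_lt.mp h1) (Ne.symm h2)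
        refine ⟨fun z hz => ?_, List.pairwise_cons.mpr h⟩
        simp at hz
        rcases hz with rfl | hz'
        · exact hyv
        · exact lt_trans hyv (h.1 z hz')

-- folding ordered insertion over any list
theorem pvFoldIUMem (l : List Int) :
    ∀ (acc : List Int) (x : Int), x ∈ l.foldl pvInsertUnique acc ↔ x ∈ acc ∨ x ∈ l := by
  induction l with
  | nil => simp
  | cons y t ih =>
    intro acc x
    simp only [List.foldl_cons, ih, pvIUMem, List.mem_cons]
    tauto

theorem pvFoldIUPairwise (l : List Int) :
    ∀ (acc : List Int), acc.Pairwise (· < ·) → (l.foldl pvInsertUnique acc).Pairwise (· < ·) := by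
  induction l with
  | nil => intro acc h; exact h
  | cons y t ih => intro acc h; exact ih _ (pvIUPairwise acc y h)

-- one loop body of B: adds exactly the members of A's per-part output
theorem pvBStepMem (acc : List Int) (part : String) (x : Int) :
    x ∈ pvBStep acc part ↔ x ∈ acc ∨ x ∈ pyParseSimple (PySem.Str.strip part) := by
  unfold pvBStep pyParseSimple
  set p := PySem.Str.strip part
  by_cases hd : PySem.Str.isIn "-" p = true
  · rw [if_pos hd, if_pos hd]
    cases hs : PySem.Str.splitMax? p "-" 1 with
    | none => simp
    | some l =>
      match l with
      | [] => simp
      | [a0] => simp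
      | a0 :: b0 :: c0 :: t => simp
      | [l0, h0] =>
        dsimp only
        set a := (PySem.Int.ofStr? l0).getD 0
        set b := (PySem.Int.ofStr? h0).getD 0
        rw [pvFoldIUMem]
        by_cases hab : a > b
        · rw [if_pos hab, min_eq_right (le_of_lt hab), max_eq_left (le_of_lt hab)]
        · rw [if_neg hab, min_eq_left (le_of_not_gt hab), max_eq_right (le_of_not_gt hab)]
  · rw [if_neg hd, if_neg hd, pvIUMem]
    simp only [List.mem_singleton]
    exact or_comm

theorem pvBStepPairwise (acc : List Int) (part : String) (h : acc.Pairwise (· < ·)) :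
    (pvBStep acc part).Pairwise (· < ·) := by
  unfold pvBStep
  by_cases hd : PySem.Str.isIn "-" (PySem.Str.strip part) = true
  · rw [if_pos hd]
    cases hs : PySem.Str.splitMax? (PySem.Str.strip part) "-" 1 with
    | none => exact h
    | some l =>
      match l with
      | [] => exact h
      | [a0] => exact h
      | a0 :: b0 :: c0 :: t => exact h
      | [l0, h0] => exact pvFoldIUPairwise _ _ h
  · rw [if_neg hd]
    exact pvIUPairwise _ _ h

-- B's whole fold: strictly sorted, members = union of A's per-part outputs
theorem pvBFoldMem (parts : List String) :
    ∀ (acc : List Int) (x : Int),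
      x ∈ parts.foldl pvBStep acc ↔
        x ∈ acc ∨ ∃ part ∈ parts, x ∈ pyParseSimple (PySem.Str.strip part) := by
  induction parts with
  | nil => simp
  | cons q t ih =>
    intro acc x
    simp only [List.foldl_cons, ih, pvBStepMem, List.mem_cons]
    constructor
    · rintro (( h | h ) | ⟨part, hp, hx⟩)
      · exact Or.inl h
      · exact Or.inr ⟨q, Or.inl rfl, h⟩
      · exact Or.inr ⟨part, Or.inr hp, hx⟩
    · rintro (h | ⟨part, (rfl | hp), hx⟩)
      · exact Or.inl (Or.inl h)
      · exact Or.inl (Or.inr hx)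
      · exact Or.inr ⟨part, hp, hx⟩

theorem pvBFoldPairwise (parts : List String) :
    ∀ (acc : List Int), acc.Pairwise (· < ·) → (parts.foldl pvBStep acc).Pairwise (· < ·) := by
  induction parts with
  | nil => intro acc h; exact h
  | cons q t ih => intro acc h; exact ih _ (pvBStepPairwise acc q h)

-- two strictly increasing lists with the same members are equal
theorem pvSortedExt :
    ∀ (l1 l2 : List Int), l1.Pairwise (· < ·) → l2.Pairwise (· < ·) →
      (∀ x, x ∈ l1 ↔ x ∈ l2) → l1 = l2 := by
  intro l1
  induction l1 with
  | nil =>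
    intro l2 _ _ hm
    cases l2 with
    | nil => rfl
    | cons b u => exact absurd ((hm b).mpr (List.mem_cons_self)) (by simp)
  | cons a t ih =>
    intro l2 h1 h2 hm
    cases l2 with
    | nil => exact absurd ((hm a).mp (List.mem_cons_self)) (by simp)
    | cons b u =>
      rw [List.pairwise_cons] at h1 h2
      have hab : a = b := by
        rcases List.mem_cons.mp ((hm a).mp List.mem_cons_self) with h | h
        · exact h
        · rcases List.mem_cons.mp ((hm b).mpr List.mem_cons_self) with h' | h'
          · exact h'.symm
          · exact absurd (lt_trans (h1.1 b h') (h2.1 a h)) (lt_irrefl a)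
      subst hab
      have htu : ∀ x, x ∈ t ↔ x ∈ u := by
        intro x
        constructor
        · intro hx
          rcases List.mem_cons.mp ((hm x).mp (List.mem_cons_of_mem _ hx)) with rfl | h
          · exact absurd (h1.1 x hx) (lt_irrefl x)
          · exact h
        · intro hx
          rcases List.mem_cons.mp ((hm x).mpr (List.mem_cons_of_mem _ hx)) with rfl | h
          · exact absurd (h2.1 x hx) (lt_irrefl x)
          · exact h
      rw [ih u h1.2 h2.2 htu]

-- ===== VERDICT (by name: the statement is the Claim_ definition above) =====
theorem parse_years_spec : Claim_equal_parse_years := by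
  intro spec _ _
  unfold Spec_parse_years parse_years parse_years_alt
  by_cases hc : PySem.Str.isIn "," (PySem.Str.strip spec) = true
  · rw [if_pos hc]
    set parts := (PySem.Str.split? (PySem.Str.strip spec) ",").getD []
    refine pvSortedExt _ _ (PySem.List.sorted_ofList_pairwise_lt _)
      (pvBFoldPairwise parts [] (by simp)) (fun x => ?_)
    rw [PySem.List.mem_sorted, PySem.Set.mem_ofList,
      PySem.List.foldl_append_eq_flatMap, pvBFoldMem]
    simp [List.mem_flatMap]
  · rw [if_neg hc]
    have hc' : PySem.Str.isIn "," (PySem.Str.strip spec) = false := by simpa using hc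
    rw [pvSplitNoComma _ hc']
    simp only [List.foldl_cons, List.foldl_nil]
    refine pvSortedExt _ _ (pvSimplePairwise _)
      (pvBStepPairwise [] _ (by simp)) (fun x => ?_)
    rw [pvBStepMem, pvStrStripStrip spec]
    simp
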